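-- pv_equiv track=rewrite | github.com/saitamashigoto/algo | fiesta.py | solve
-- ===== SOURCE A (Python) =====
-- def solve(a):
--     odd = []
--     even = []
--     p = 10**9 + 7
--     for i in a:
--         if i % 2:
--             odd.append(i)
--         else:
--             even.append(i)
--     res = 0
--     odd_len = len(odd)
--     even_len = len(even)
--     X = 0 if even_len == 0 else (2**even_len) - 1
--     Y =  0 if odd_len==0 else 2**(odd_len-1) - 1
--
--     res = (X + Y + X*Y) % p
--     return res
-- ===== SOURCE B (Python) =====
-- def solve(a):
--     p = 10**9 + 7
--     has_odd = any(i % 2 for i in a)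
--     e = len(a) - 1 if has_odd else len(a)
--     return (pow(2, e, p) - 1) % p
-- ===== Notes on version B (the rewrite author's own statement) =====
-- stated objective: faster
-- what changed: Replaces the odd/even list partition and huge-integer 2**n powers by a single any() scan for an odd element and one modular exponentiation pow(2, n-1 or n, p), using the identity X+Y+XY = (X+1)(Y+1)-1.
import Mathlib
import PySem

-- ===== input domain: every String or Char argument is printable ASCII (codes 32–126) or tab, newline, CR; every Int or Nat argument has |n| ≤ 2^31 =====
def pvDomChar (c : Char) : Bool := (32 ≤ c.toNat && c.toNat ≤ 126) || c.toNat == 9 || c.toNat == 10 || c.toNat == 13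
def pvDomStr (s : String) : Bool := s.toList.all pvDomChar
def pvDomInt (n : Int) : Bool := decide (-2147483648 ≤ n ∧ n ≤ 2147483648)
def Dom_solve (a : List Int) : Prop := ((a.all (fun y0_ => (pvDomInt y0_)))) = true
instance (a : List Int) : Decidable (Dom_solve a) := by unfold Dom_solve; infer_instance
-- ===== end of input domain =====

-- B replaces A's odd/even list partition and exact big-integer powers 2**n by one scan
-- for an odd element and a single modular power (measured faster; asymptotic change).

-- ===== PORT A =====
def solve (a : List Int) : Int :=
  let p : Int := 10 ^ 9 + 7
  let st := a.foldl
    (fun (st : List Int × List Int) i =>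
      if PySem.Int.mod i 2 ≠ 0 then (st.1 ++ [i], st.2) else (st.1, st.2 ++ [i]))
    ([], [])
  let odd_len := st.1.length
  let even_len := st.2.length
  let X : Int := if even_len = 0 then 0 else 2 ^ even_len - 1
  let Y : Int := if odd_len = 0 then 0 else 2 ^ (odd_len - 1) - 1
  PySem.Int.mod (X + Y + X * Y) p

-- ===== PORT B =====
-- pow(2, e, p) is ported as (2 ^ e) % p with Python's % — exact for the positive modulus p.
def solve_alt (a : List Int) : Int :=
  let p : Int := 10 ^ 9 + 7
  let hasOdd := a.any (fun i => PySem.Int.mod i 2 != 0)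
  let e : Nat := if hasOdd then a.length - 1 else a.length
  PySem.Int.mod (PySem.Int.mod ((2 : Int) ^ e) p - 1) p

-- ===== PRECONDITION & SPEC =====
def Spec_solve (a : List Int) (out : Int) : Prop := out = solve_alt a
instance (a : List Int) (out : Int) : Decidable (Spec_solve a out) := by unfold Spec_solve; infer_instance

-- ===== CLAIM (what is proved, stated in full; the proofs are below) =====
def Claim_equal_solve : Prop := ∀ (a : List Int), Dom_solve a → Spec_solve a (solve a)

-- ===== LEMMAS AND PROOFS =====

-- A's partition loop produces the two filters of the input list.
theorem pv_fold_eq (a o e : List Int) :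
    a.foldl
      (fun (st : List Int × List Int) i =>
        if PySem.Int.mod i 2 ≠ 0 then (st.1 ++ [i], st.2) else (st.1, st.2 ++ [i]))
      (o, e)
    = (o ++ a.filter (fun i => PySem.Int.mod i 2 != 0),
       e ++ a.filter (fun i => !(PySem.Int.mod i 2 != 0))) := by
  induction a generalizing o e with
  | nil => simp
  | cons x xs ih =>
    have hm : PySem.Int.mod x 2 = x % 2 := PySem.Int.mod_eq_emod_of_pos (by norm_num)
    simp only [List.foldl_cons, List.filter_cons]
    rcases Int.emod_two_eq x with h | h
    · have hc : ¬ (PySem.Int.mod x 2 ≠ 0) := by rw [hm, h]; simp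
      have hb : (PySem.Int.mod x 2 != 0) = false := by rw [hm, h]; rfl
      rw [if_neg hc, ih]
      simp only [hb, Bool.false_eq_true, if_false, Bool.not_false, if_true,
        List.append_assoc, List.singleton_append]
    · have hc : PySem.Int.mod x 2 ≠ 0 := by rw [hm, h]; norm_num
      have hb : (PySem.Int.mod x 2 != 0) = true := by rw [hm, h]; rfl
      rw [if_pos hc, ih]
      simp only [hb, if_true, Bool.not_true, Bool.false_eq_true, if_false,
        List.append_assoc, List.singleton_append]

theorem pv_any_iff (a : List Int) :
    (a.any (fun i => PySem.Int.mod i 2 != 0) = true)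
      ↔ (a.filter (fun i => PySem.Int.mod i 2 != 0)).length ≠ 0 := by
  simp [List.any_eq_true, List.length_eq_zero_iff, List.filter_eq_nil_iff]

theorem pv_len_sum (a : List Int) :
    (a.filter (fun i => PySem.Int.mod i 2 != 0)).length
      + (a.filter (fun i => !(PySem.Int.mod i 2 != 0))).length = a.length := by
  induction a with
  | nil => rfl
  | cons x xs ih =>
    have hm : PySem.Int.mod x 2 = x % 2 := PySem.Int.mod_eq_emod_of_pos (by norm_num)
    simp only [List.filter_cons]
    rcases Int.emod_two_eq x with h | h
    · have hb : (PySem.Int.mod x 2 != 0) = false := by rw [hm, h]; rfl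
      simp only [hb, Bool.false_eq_true, if_false, Bool.not_false, if_true, List.length_cons]
      omega
    · have hb : (PySem.Int.mod x 2 != 0) = true := by rw [hm, h]; rfl
      simp only [hb, if_true, Bool.not_true, Bool.false_eq_true, if_false, List.length_cons]
      omega

-- A's X + Y + X*Y equals (X+1)(Y+1) - 1 = 2^(o+e-1) - 1 (or 2^e - 1 when o = 0).
theorem pv_value (o e : Nat) :
    (if e = 0 then (0 : Int) else 2 ^ e - 1) + (if o = 0 then (0 : Int) else 2 ^ (o - 1) - 1)
      + (if e = 0 then (0 : Int) else 2 ^ e - 1) * (if o = 0 then (0 : Int) else 2 ^ (o - 1) - 1)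
    = 2 ^ (if o = 0 then e else o + e - 1) - 1 := by
  have hX : (if e = 0 then (0 : Int) else 2 ^ e - 1) = 2 ^ e - 1 := by
    split
    · simp [*]
    · rfl
  rw [hX]
  by_cases ho : o = 0
  · simp [ho]
  · have h : o + e - 1 = (o - 1) + e := by omega
    simp only [ho, if_false, h, pow_add]
    ring

-- Reducing the base mod p first does not change the final residue.
theorem pv_mod_pow (E : Nat) :
    PySem.Int.mod ((2 : Int) ^ E - 1) (10 ^ 9 + 7)
      = PySem.Int.mod (PySem.Int.mod ((2 : Int) ^ E) (10 ^ 9 + 7) - 1) (10 ^ 9 + 7) := by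
  have hp : (0 : Int) < 10 ^ 9 + 7 := by norm_num
  rw [PySem.Int.mod_eq_emod_of_pos hp, PySem.Int.mod_eq_emod_of_pos hp,
    PySem.Int.mod_eq_emod_of_pos hp]
  conv_lhs => rw [Int.sub_emod]
  conv_rhs => rw [Int.sub_emod, Int.emod_emod_of_dvd _ dvd_rfl]

-- ===== VERDICT (by name: the statement is the Claim_ definition above) =====
theorem solve_spec : Claim_equal_solve := by
  intro a _
  unfold Spec_solve solve solve_alt
  rw [pv_fold_eq]
  simp only [List.nil_append]
  rw [← pv_mod_pow]
  rw [pv_value]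
  congr 2
  by_cases h : a.any (fun i => PySem.Int.mod i 2 != 0) = true
  · have ho := (pv_any_iff a).mp h
    have := pv_len_sum a
    simp only [h, if_true, if_neg ho]
    congr 1
    omega
  · have ho : (a.filter (fun i => PySem.Int.mod i 2 != 0)).length = 0 := by
      by_contra hc
      exact h ((pv_any_iff a).mpr hc)
    have := pv_len_sum a
    simp only [eq_false_of_ne_true h, Bool.false_eq_true, if_false, ho, if_true]
    congr 1
    omega
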